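-- pv_equiv track=rewrite | github.com/Guardefi/landing1.2 | Desktop/Scorpius1.3-main/backend/Bytecode/preprocessors/bytecode_normalizer.py | _extract_control_flow_features
-- ===== SOURCE A (Python) =====
-- from typing import Dict, List, Tuple
--
-- def _extract_control_flow_features(opcodes: List[Dict]) -> Dict:
--     """Extract control flow related features"""
--     jump_count = 0
--     jumpi_count = 0
--     jumpdest_count = 0
--
--     for opcode in opcodes:
--         if opcode["mnemonic"] == "JUMP":
--             jump_count += 1
--         elif opcode["mnemonic"] == "JUMPI":
--             jumpi_count += 1
--         elif opcode["mnemonic"] == "JUMPDEST":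
--             jumpdest_count += 1
--
--     return {
--         "jump_count": jump_count,
--         "jumpi_count": jumpi_count,
--         "jumpdest_count": jumpdest_count,
--         "total_jumps": jump_count + jumpi_count,
--     }
-- ===== SOURCE B (Python) =====
-- def _extract_control_flow_features(opcodes):
--     """Extract control flow related features"""
--     def counts(ops):
--         # divide and conquer: counts of (JUMP, JUMPI, JUMPDEST) in ops
--         if not ops:
--             return (0, 0, 0)
--         if len(ops) == 1:
--             m = ops[0]["mnemonic"]
--             return (int(m == "JUMP"), int(m == "JUMPI"), int(m == "JUMPDEST"))
--         mid = len(ops) // 2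
--         l = counts(ops[:mid])
--         r = counts(ops[mid:])
--         return (l[0] + r[0], l[1] + r[1], l[2] + r[2])
--
--     j, ji, jd = counts(opcodes)
--     return {
--         "jump_count": j,
--         "jumpi_count": ji,
--         "jumpdest_count": jd,
--         "total_jumps": j + ji,
--     }
-- ===== Notes on version B (the rewrite author's own statement) =====
-- stated objective: alternative
-- what changed: Replaces A's single linear pass with an if/elif chain over three scalar counters by a divide-and-conquer recursion that splits the opcode list in half, counts each half, and merges the count triples by addition (correct because occurrence counts are additive over concatenation).
import Mathlib
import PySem

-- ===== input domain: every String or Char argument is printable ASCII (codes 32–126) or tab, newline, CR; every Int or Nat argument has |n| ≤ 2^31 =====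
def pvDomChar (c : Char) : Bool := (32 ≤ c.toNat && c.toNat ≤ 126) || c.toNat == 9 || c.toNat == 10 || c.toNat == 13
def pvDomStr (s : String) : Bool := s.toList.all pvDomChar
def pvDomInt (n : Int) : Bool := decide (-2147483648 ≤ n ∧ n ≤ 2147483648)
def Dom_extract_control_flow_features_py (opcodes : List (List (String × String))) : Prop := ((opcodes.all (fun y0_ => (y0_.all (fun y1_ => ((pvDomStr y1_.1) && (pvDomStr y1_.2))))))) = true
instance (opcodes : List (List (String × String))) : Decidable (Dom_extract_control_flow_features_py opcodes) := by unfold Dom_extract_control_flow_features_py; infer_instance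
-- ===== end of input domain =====

-- B replaces A's single linear scan (if/elif chain over three scalar counters) by a
-- divide-and-conquer recursion: split the list in half, count each half, add the count
-- triples (objective: alternative; counts are additive over concatenation).

-- ===== PORT A =====
-- opcode["mnemonic"]: total form of the dict subscript, exact under Pre_ (key present)
def pvMnem (op : List (String × String)) : String :=
  (PySem.Dict.mk op).getD "mnemonic" ""

def extract_control_flow_features_py (opcodes : List (List (String × String))) : List (String × Int) :=
  let acc := opcodes.foldl (fun (s : Int × Int × Int) op =>
      if pvMnem op = "JUMP" then (s.1 + 1, s.2.1, s.2.2)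
      else if pvMnem op = "JUMPI" then (s.1, s.2.1 + 1, s.2.2)
      else if pvMnem op = "JUMPDEST" then (s.1, s.2.1, s.2.2 + 1)
      else s) (0, 0, 0)
  [("jump_count", acc.1), ("jumpi_count", acc.2.1),
   ("jumpdest_count", acc.2.2), ("total_jumps", acc.1 + acc.2.1)]

-- ===== PORT B =====
-- counts(ops): divide-and-conquer count of (JUMP, JUMPI, JUMPDEST) in ops
def pvCounts : List (List (String × String)) → Int × Int × Int
  | [] => (0, 0, 0)
  | [op] => ((if pvMnem op = "JUMP" then 1 else 0),
             (if pvMnem op = "JUMPI" then 1 else 0),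
             (if pvMnem op = "JUMPDEST" then 1 else 0))
  | x :: y :: rest =>
      let ops := x :: y :: rest
      let mid := ops.length / 2
      let l := pvCounts (ops.take mid)
      let r := pvCounts (ops.drop mid)
      (l.1 + r.1, l.2.1 + r.2.1, l.2.2 + r.2.2)
termination_by ops => ops.length
decreasing_by
  · simp [List.length_take]; omega
  · simp; omega

def extract_control_flow_features_py_alt (opcodes : List (List (String × String))) : List (String × Int) :=
  let c := pvCounts opcodes
  [("jump_count", c.1), ("jumpi_count", c.2.1),
   ("jumpdest_count", c.2.2), ("total_jumps", c.1 + c.2.1)]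

-- ===== PRECONDITION & SPEC =====
-- Pre_ excludes exactly the inputs where both A and B raise KeyError: an opcode dict without a "mnemonic" key.
def Pre_extract_control_flow_features_py (opcodes : List (List (String × String))) : Prop :=
  ∀ op ∈ opcodes, (PySem.Dict.mk op).contains "mnemonic" = true
instance (opcodes : List (List (String × String))) : Decidable (Pre_extract_control_flow_features_py opcodes) := by
  unfold Pre_extract_control_flow_features_py; infer_instance

def pvWitness_extract_control_flow_features_py : (List (List (String × String))) :=
  [[("mnemonic", "JUMP")], [("mnemonic", "ADD")]]

def Spec_extract_control_flow_features_py (opcodes : List (List (String × String))) (out : List (String × Int)) : Prop := out = extract_control_flow_features_py_alt opcodes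
instance (opcodes : List (List (String × String))) (out : List (String × Int)) : Decidable (Spec_extract_control_flow_features_py opcodes out) := by unfold Spec_extract_control_flow_features_py; infer_instance

-- ===== CLAIM (what is proved, stated in full; the proofs are below) =====
def Claim_equal_extract_control_flow_features_py : Prop := ∀ (opcodes : List (List (String × String))), Dom_extract_control_flow_features_py opcodes → Pre_extract_control_flow_features_py opcodes → Spec_extract_control_flow_features_py opcodes (extract_control_flow_features_py opcodes)

-- ===== LEMMAS AND PROOFS =====
theorem pv_foldl_counts (opcodes : List (List (String × String))) (a b c : Int) :
    opcodes.foldl (fun (s : Int × Int × Int) op =>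
      if pvMnem op = "JUMP" then (s.1 + 1, s.2.1, s.2.2)
      else if pvMnem op = "JUMPI" then (s.1, s.2.1 + 1, s.2.2)
      else if pvMnem op = "JUMPDEST" then (s.1, s.2.1, s.2.2 + 1)
      else s) (a, b, c)
    = (a + ((opcodes.map pvMnem).count "JUMP" : Int),
       b + ((opcodes.map pvMnem).count "JUMPI" : Int),
       c + ((opcodes.map pvMnem).count "JUMPDEST" : Int)) := by
  induction opcodes generalizing a b c with
  | nil => simp
  | cons op rest ih =>
    simp only [List.foldl_cons, List.map_cons]
    by_cases h1 : pvMnem op = "JUMP"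
    · simp [h1, ih]; ring
    · by_cases h2 : pvMnem op = "JUMPI"
      · simp [h2, ih]; ring
      · by_cases h3 : pvMnem op = "JUMPDEST"
        · simp [h3, ih]; ring
        · simp [h1, h2, h3, ih]

theorem pv_counts_eq (opcodes : List (List (String × String))) :
    pvCounts opcodes
    = (((opcodes.map pvMnem).count "JUMP" : Int),
       ((opcodes.map pvMnem).count "JUMPI" : Int),
       ((opcodes.map pvMnem).count "JUMPDEST" : Int)) := by
  fun_induction pvCounts opcodes with
  | case1 => simp
  | case2 op =>
    by_cases h1 : pvMnem op = "JUMP" <;> by_cases h2 : pvMnem op = "JUMPI" <;>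
      by_cases h3 : pvMnem op = "JUMPDEST" <;>
      simp_all
  | case3 x y rest ops mid l r ihl ihr =>
    have hsplit : ops.take mid ++ ops.drop mid = ops := List.take_append_drop mid ops
    have key : ∀ s : String,
        ((List.map pvMnem (x :: y :: rest)).count s : Int)
        = ((ops.take mid).map pvMnem).count s + ((ops.drop mid).map pvMnem).count s := by
      intro s
      rw [show (x :: y :: rest : List (List (String × String))) = ops.take mid ++ ops.drop mid
            from hsplit.symm, List.map_append, List.count_append]
      push_cast; ring
    simp only [l, r, ihl, ihr, key]

-- ===== VERDICT (by name: the statement is the Claim_ definition above) =====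
theorem extract_control_flow_features_py_spec : Claim_equal_extract_control_flow_features_py := by
  intro opcodes _ _
  unfold Spec_extract_control_flow_features_py
  unfold extract_control_flow_features_py extract_control_flow_features_py_alt
  simp [pv_foldl_counts, pv_counts_eq]
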